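-- pv_equiv track=rewrite | github.com/CarlosAraujo7/Fundamentals-of-Programming-Assignments | Trabalho 5.py | amigos_em_comum
-- ===== SOURCE A (Python) =====
-- def amigos_em_comum(i: int, j: int, matriz: list):
--     contadora = 0
--     lista = []
--     for i2 in range(len(matriz[i])):
--         if i != i2 and j != i2:
--             if matriz[i][i2] == 1 and matriz[j][i2] == 1:
--                 contadora += 1
--                 lista.append(i2)
--
--     return(contadora, lista)
-- ===== SOURCE B (Python) =====
-- def amigos_em_comum(i: int, j: int, matriz: list):
--     amigos_i = {k for k, v in enumerate(matriz[i]) if v == 1}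
--     amigos_j = {k for k, v in enumerate(matriz[j]) if v == 1}
--     comuns = sorted((amigos_i & amigos_j) - {i, j})
--     return (len(comuns), comuns)
-- ===== Notes on version B (the rewrite author's own statement) =====
-- stated objective: idiomatic
-- what changed: Replaces A's single guarded counting pass (which probes row j lazily at each candidate) with two independent set builds over each row's own indices, a set intersection, removal of {i, j}, and a sort.
-- outside the precondition, e.g. on amigos_em_comum(0, 5, [[0, 0]]): A returns (0, []), B raises IndexError
import Mathlib
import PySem

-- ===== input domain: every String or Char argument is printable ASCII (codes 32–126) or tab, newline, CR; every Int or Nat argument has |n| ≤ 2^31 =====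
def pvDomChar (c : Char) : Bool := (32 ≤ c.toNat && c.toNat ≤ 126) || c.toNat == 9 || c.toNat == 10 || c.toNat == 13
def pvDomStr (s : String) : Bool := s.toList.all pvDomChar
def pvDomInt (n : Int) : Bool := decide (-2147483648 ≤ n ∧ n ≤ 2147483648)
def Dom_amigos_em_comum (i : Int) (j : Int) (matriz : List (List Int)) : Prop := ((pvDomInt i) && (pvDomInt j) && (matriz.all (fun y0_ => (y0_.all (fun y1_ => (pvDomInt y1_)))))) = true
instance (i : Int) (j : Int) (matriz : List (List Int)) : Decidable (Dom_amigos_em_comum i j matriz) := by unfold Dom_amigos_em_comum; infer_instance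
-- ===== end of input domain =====

-- B replaces A's single guarded pass with two set builds (friend indices of row i and
-- of row j), a set intersection minus {i, j}, and a sort (objective: idiomatic).

-- ===== PORT A =====
def amigos_em_comum (i : Int) (j : Int) (matriz : List (List Int)) : Int × List Int :=
  -- contadora = 0; lista = []; for i2 in range(len(matriz[i])): …
  (PySem.List.pyRange 0 ((PySem.List.pyGetD matriz i []).length : Int) 1).foldl
    (fun (st : Int × List Int) i2 =>
      if i ≠ i2 ∧ j ≠ i2 then
        if PySem.List.pyGetD (PySem.List.pyGetD matriz i []) i2 0 = 1 ∧
           PySem.List.pyGetD (PySem.List.pyGetD matriz j []) i2 0 = 1 then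
          (st.1 + 1, st.2 ++ [i2])
        else st
      else st)
    (0, [])

-- ===== PORT B =====
def amigos_em_comum_alt (i : Int) (j : Int) (matriz : List (List Int)) : Int × List Int :=
  -- amigos_i = {k for k, v in enumerate(matriz[i]) if v == 1}; same for amigos_j
  let amigos_i : PySem.Set Int :=
    PySem.Set.ofList (((PySem.List.enumerate (PySem.List.pyGetD matriz i [])).filter
      (fun p => p.2 == 1)).map (·.1))
  let amigos_j : PySem.Set Int :=
    PySem.Set.ofList (((PySem.List.enumerate (PySem.List.pyGetD matriz j [])).filter
      (fun p => p.2 == 1)).map (·.1))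
  -- comuns = sorted((amigos_i & amigos_j) - {i, j})
  let comuns := PySem.List.sorted
    (PySem.Set.diff (PySem.Set.inter amigos_i amigos_j) (PySem.Set.ofList [i, j]))
    (fun x => x) false
  ((comuns.length : Int), comuns)

-- ===== PRECONDITION & SPEC =====
-- Pre_ excludes the inputs where Python A raises IndexError (i out of range, or a
-- common-friend candidate k of row i forcing an out-of-range access into row j), and
-- additionally the inputs where j is an invalid row index while row i yields no
-- candidate — there A accidentally returns (0, []) without ever touching matriz[j],
-- an artefact of its lazy access, while B's eager build of amigos_j raises IndexError.
def Pre_amigos_em_comum (i : Int) (j : Int) (matriz : List (List Int)) : Prop :=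
  PySem.Raise.InRange matriz.length i ∧
  PySem.Raise.InRange matriz.length j ∧
  ∀ k ∈ List.range (PySem.List.pyGetD matriz i []).length,
    (i ≠ (k : Int) ∧ j ≠ (k : Int) ∧ (PySem.List.pyGetD matriz i []).getD k 0 = 1) →
      k < (PySem.List.pyGetD matriz j []).length
instance (i : Int) (j : Int) (matriz : List (List Int)) : Decidable (Pre_amigos_em_comum i j matriz) := by unfold Pre_amigos_em_comum; infer_instance

def pvWitness_amigos_em_comum : Int × Int × List (List Int) := (0, 1, [[0, 1, 1], [1, 0, 1]])

def Spec_amigos_em_comum (i : Int) (j : Int) (matriz : List (List Int)) (out : Int × List Int) : Prop := out = amigos_em_comum_alt i j matriz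
instance (i : Int) (j : Int) (matriz : List (List Int)) (out : Int × List Int) : Decidable (Spec_amigos_em_comum i j matriz out) := by unfold Spec_amigos_em_comum; infer_instance

-- ===== CLAIM (what is proved, stated in full; the proofs are below) =====
def Claim_equal_amigos_em_comum : Prop := ∀ (i : Int) (j : Int) (matriz : List (List Int)), Dom_amigos_em_comum i j matriz → Pre_amigos_em_comum i j matriz → Spec_amigos_em_comum i j matriz (amigos_em_comum i j matriz)

-- ===== LEMMAS AND PROOFS =====

theorem keylist_eq (r : List Int) :
    ((PySem.List.enumerate r).filter (fun p => p.2 == 1)).map (·.1)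
      = (PySem.List.pyRange 0 (r.length : Int)).filter
          (fun k => PySem.List.pyGetD r k 0 == 1) := by
  rw [PySem.List.enumerate_eq_map_pyRange r 0]
  simp only [List.filter_map]
  rw [List.map_map]
  simp [Function.comp_def]

theorem foldl_nested_pair (P Q : Int → Prop) [DecidablePred P] [DecidablePred Q]
    (l : List Int) (c : Int) (acc : List Int) :
    l.foldl (fun (st : Int × List Int) k =>
        if P k then (if Q k then (st.1 + 1, st.2 ++ [k]) else st) else st) (c, acc)
      = (c + ((l.filter (fun k => decide (P k ∧ Q k))).length : Int),
         acc ++ l.filter (fun k => decide (P k ∧ Q k))) := by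
  induction l generalizing c acc with
  | nil => simp
  | cons x xs ih =>
    by_cases hp : P x <;> by_cases hq : Q x <;>
      (simp [hp, hq, ih]; try omega)

theorem ports_eq (i j : Int) (matriz : List (List Int))
    (hpre : Pre_amigos_em_comum i j matriz) :
    amigos_em_comum i j matriz = amigos_em_comum_alt i j matriz := by
  obtain ⟨-, -, hk⟩ := hpre
  unfold amigos_em_comum amigos_em_comum_alt
  set ri := PySem.List.pyGetD matriz i [] with hri
  set rj := PySem.List.pyGetD matriz j [] with hrj
  rw [foldl_nested_pair (fun k => i ≠ k ∧ j ≠ k)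
      (fun k => PySem.List.pyGetD ri k 0 = 1 ∧ PySem.List.pyGetD rj k 0 = 1)]
  simp only [keylist_eq]
  rw [PySem.Set.ofList_eq_self_of_nodup _ ((PySem.List.nodup_pyRange_one _ _).filter _),
      PySem.Set.ofList_eq_self_of_nodup _ ((PySem.List.nodup_pyRange_one _ _).filter _)]
  have hM :
      PySem.Set.diff
          (PySem.Set.inter
            ((PySem.List.pyRange 0 (ri.length:Int)).filter (fun k => PySem.List.pyGetD ri k 0 == 1))
            ((PySem.List.pyRange 0 (rj.length:Int)).filter (fun k => PySem.List.pyGetD rj k 0 == 1)))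
          (PySem.Set.ofList [i, j])
      = (PySem.List.pyRange 0 (ri.length:Int)).filter
          (fun k => decide ((i ≠ k ∧ j ≠ k) ∧ PySem.List.pyGetD ri k 0 = 1 ∧ PySem.List.pyGetD rj k 0 = 1)) := by
    simp only [PySem.Set.diff, PySem.Set.inter, List.filter_filter]
    refine List.filter_congr ?_
    intro k hkmem
    rcases PySem.List.mem_pyRange_one.mp hkmem with ⟨h0, hlt⟩
    rw [Bool.eq_iff_iff]
    simp only [Bool.and_eq_true, Bool.not_eq_eq_eq_not, Bool.not_true, beq_iff_eq,
      decide_eq_true_eq, PySem.Set.contains, List.contains_eq_mem, decide_eq_false_iff_not,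
      List.mem_filter, PySem.List.mem_pyRange_one, PySem.Set.mem_ofList, List.mem_cons,
      List.not_mem_nil, or_false]
    rw [PySem.List.pyGetD_of_nonneg ri 0 h0, PySem.List.pyGetD_of_nonneg rj 0 h0]
    constructor
    · rintro ⟨hnot, ⟨-, hgj⟩, hgi⟩
      exact ⟨⟨fun h => hnot (Or.inl h.symm), fun h => hnot (Or.inr h.symm)⟩, hgi, hgj⟩
    · rintro ⟨⟨hne1, hne2⟩, hgi, hgj⟩
      have hkcast : ((k.toNat : Nat) : Int) = k := Int.toNat_of_nonneg h0
      have hkj : k.toNat < rj.length := by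
        refine hk k.toNat (by simp only [List.mem_range]; omega) ?_
        rw [hkcast]
        exact ⟨hne1, hne2, hgi⟩
      exact ⟨by rintro (h | h); exacts [hne1 h.symm, hne2 h.symm],
        ⟨⟨h0, by omega⟩, hgj⟩, hgi⟩
  rw [hM]
  rw [PySem.List.sorted_eq_of_perm_of_pairwise_lt _ _ (fun x => x) (List.Perm.refl _)
      (((PySem.List.pairwise_lt_pyRange_one 0 _).filter _))]
  simp

-- ===== VERDICT (by name: the statement is the Claim_ definition above) =====
theorem amigos_em_comum_spec : Claim_equal_amigos_em_comum := by
  intro i j matriz _ hpre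
  unfold Spec_amigos_em_comum
  exact ports_eq i j matriz hpre
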